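-- pv_equiv track=rewrite | github.com/evank28/ContestCoding | hackerrank/Zippity_2020/racing-car.py | minimumMovement
-- ===== SOURCE A (Python) =====
-- def minimumMovement(obstacleLanes: list) -> int:
--     """
--     >>> minimumMovement([2,1,2])
--     1
--     >>> minimumMovement([2,1,3,2])
--     2
--     """
--     moves = 0
--     current_lane = 2
--     for i, obstacle in enumerate(obstacleLanes):
--         if obstacle == current_lane:
--             next_different_obstacle = \
--                 next_different(current_lane, obstacleLanes[i:])
--             if next_different_obstacle == 0:
--                 current_lane = list({1, 2, 3} - {current_lane})[0]
--             else:
--                 current_lane = \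
--                     list({1, 2, 3} - {current_lane, next_different_obstacle})[0]
--             moves += 1
--         else:
--             continue
--     return moves
--
-- def next_different(current_lane, obstacles) -> int:
--     for obstacle in obstacles:
--         if obstacle != current_lane:
--             return obstacle
--     return 0
-- ===== SOURCE B (Python) =====
-- def minimumMovement(obstacleLanes: list) -> int:
--     # One pass: compress the list into runs of equal values; a run can collide
--     # with the current lane at most once, and the "next different obstacle" is
--     # simply the value of the following run -- no rescan/slice needed.
--     runs = []
--     prev = None
--     for v in obstacleLanes:
--         if prev is None or v != prev:
--             runs.append(v)
--             prev = v
--     moves = 0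
--     cl = 2
--     for j, v in enumerate(runs):
--         if v == cl:
--             nd = runs[j + 1] if j + 1 < len(runs) else 0
--             cl = 1 if cl != 1 and nd != 1 else (2 if cl != 2 and nd != 2 else 3)
--             moves += 1
--     return moves
-- ===== Notes on version B (the rewrite author's own statement) =====
-- stated objective: alternative
-- what changed: Run-length compress the lane list once, then make one pass over the runs taking the next run's value as the 'next different obstacle', instead of A's forward rescan plus slice copy at every collision.
import Mathlib
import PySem

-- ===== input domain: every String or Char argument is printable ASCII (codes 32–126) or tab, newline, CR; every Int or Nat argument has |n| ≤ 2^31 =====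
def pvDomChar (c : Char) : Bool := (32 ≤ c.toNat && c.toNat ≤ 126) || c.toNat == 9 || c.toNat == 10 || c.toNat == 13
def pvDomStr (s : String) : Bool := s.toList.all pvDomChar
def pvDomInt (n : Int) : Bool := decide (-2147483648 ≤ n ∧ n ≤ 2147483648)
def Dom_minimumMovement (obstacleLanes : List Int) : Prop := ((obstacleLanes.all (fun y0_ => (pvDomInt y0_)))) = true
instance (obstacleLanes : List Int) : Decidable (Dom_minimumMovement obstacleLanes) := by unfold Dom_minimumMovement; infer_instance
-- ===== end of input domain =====

-- B replaces A's forward rescan + slice at every collision by one run-length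
-- compression pass followed by one pass over the runs (objective: alternative).

-- ===== PORT A =====
-- next_different(current_lane, obstacles)
def nextDifferent (currentLane : Int) : List Int → Int
  | [] => 0
  | o :: rest => if o ≠ currentLane then o else nextDifferent currentLane rest

-- list({1, 2, 3} - set(excl))[0]: exact here because CPython iterates this
-- subset of {1, 2, 3} (small ints, hash(k) = k) in ascending = insertion order,
-- and the set difference is never empty, so [0] is the head.
def pickA (excl : List Int) : Int :=
  (PySem.Set.diff (PySem.Set.ofList [1, 2, 3]) (PySem.Set.ofList excl)).headD 0

-- the for-loop of A; at position i the slice obstacleLanes[i:] IS o :: rest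
def minimumMovementGo (moves currentLane : Int) : List Int → Int
  | [] => moves
  | o :: rest =>
    if o == currentLane then
      let nd := nextDifferent currentLane (o :: rest)
      let cl' := if nd == 0 then pickA [currentLane] else pickA [currentLane, nd]
      minimumMovementGo (moves + 1) cl' rest
    else
      minimumMovementGo moves currentLane rest

def minimumMovement (obstacleLanes : List Int) : Int :=
  minimumMovementGo 0 2 obstacleLanes

-- ===== PORT B =====
-- run-length compression loop of Source B (prev = None handled by the first split)
def runsAux (prev : Int) : List Int → List Int
  | [] => []
  | v :: rest => if v == prev then runsAux prev rest else v :: runsAux v rest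

def runsB : List Int → List Int
  | [] => []
  | v :: rest => v :: runsAux v rest

-- 1 if cl != 1 and nd != 1 else (2 if cl != 2 and nd != 2 else 3)
def pickB (cl nd : Int) : Int :=
  if cl ≠ 1 ∧ nd ≠ 1 then 1 else if cl ≠ 2 ∧ nd ≠ 2 then 2 else 3

-- the loop over the runs; runs[j+1] (0 if absent) is the head of the rest
def minimumMovementAltGo (moves cl : Int) : List Int → Int
  | [] => moves
  | v :: rest =>
    if v == cl then
      minimumMovementAltGo (moves + 1) (pickB cl (rest.headD 0)) rest
    else
      minimumMovementAltGo moves cl rest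

def minimumMovement_alt (obstacleLanes : List Int) : Int :=
  minimumMovementAltGo 0 2 (runsB obstacleLanes)

-- ===== PRECONDITION & SPEC =====
def Spec_minimumMovement (obstacleLanes : List Int) (out : Int) : Prop := out = minimumMovement_alt obstacleLanes
instance (obstacleLanes : List Int) (out : Int) : Decidable (Spec_minimumMovement obstacleLanes out) := by unfold Spec_minimumMovement; infer_instance

-- ===== CLAIM (what is proved, stated in full; the proofs are below) =====
def Claim_equal_minimumMovement : Prop := ∀ (obstacleLanes : List Int), Dom_minimumMovement obstacleLanes → Spec_minimumMovement obstacleLanes (minimumMovement obstacleLanes)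

-- ===== LEMMAS AND PROOFS =====

-- A's set pick, written out: lowest lane not excluded (singleton exclusion)
theorem pickA_single (cl : Int) :
    pickA [cl] = if (1:Int) = cl then 2 else 1 := by
  rcases eq_or_ne (1:Int) cl with h1 | h1 <;> rcases eq_or_ne (2:Int) cl with h2 | h2 <;>
    subst_vars <;>
    simp_all [pickA, PySem.Set.diff, PySem.Set.ofList, PySem.Set.add, PySem.Set.empty,
      PySem.Set.contains, List.contains_eq_mem, List.filter_cons]

-- A's set pick, written out: lowest lane not excluded (two-element exclusion)
theorem pickA_pair (cl nd : Int) :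
    pickA [cl, nd] = if (1:Int) ≠ cl ∧ (1:Int) ≠ nd then 1
      else if (2:Int) ≠ cl ∧ (2:Int) ≠ nd then 2 else 3 := by
  rcases eq_or_ne (1:Int) cl with h1c | h1c <;> rcases eq_or_ne (2:Int) cl with h2c | h2c <;>
    rcases eq_or_ne (1:Int) nd with h1n | h1n <;> rcases eq_or_ne (2:Int) nd with h2n | h2n <;>
    subst_vars <;>
    simp_all [pickA, PySem.Set.diff, PySem.Set.ofList, PySem.Set.add, PySem.Set.empty,
      PySem.Set.contains, List.contains_eq_mem, List.filter_cons] <;>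
    (try (split_ifs <;> simp_all))

-- A's branch on next_different equals B's conditional chain
theorem pick_eq (cl nd : Int) :
    (if nd == 0 then pickA [cl] else pickA [cl, nd]) = pickB cl nd := by
  rcases eq_or_ne nd 0 with h0 | h0
  · subst h0
    rw [if_pos (by simp), pickA_single, pickB]
    split_ifs <;> omega
  · rw [if_neg (by simpa using h0), pickA_pair, pickB]
    split_ifs <;> omega

-- the picked lane always differs from the current one
theorem pickB_ne (cl nd : Int) : pickB cl nd ≠ cl := by
  unfold pickB; split_ifs <;> omega

-- A's next_different is the head of the suffix with the leading cl's dropped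
theorem nextDifferent_eq_dropWhile (cl : Int) (xs : List Int) :
    nextDifferent cl xs = (xs.dropWhile (fun y => y == cl)).headD 0 := by
  induction xs with
  | nil => rfl
  | cons x rest ih =>
    by_cases h : x = cl
    · simp [nextDifferent, h, ih]
    · simp [nextDifferent, h]

-- the compression loop restarted after prev = x
theorem runsAux_eq_runsB (x : Int) (xs : List Int) :
    runsAux x xs = runsB (xs.dropWhile (fun y => y == x)) := by
  induction xs generalizing x with
  | nil => rfl
  | cons y rest ih =>
    by_cases h : y = x
    · simp [runsAux, h, ih]
    · simp [runsAux, h, runsB, ih y]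

-- compression preserves the first element
theorem runsB_headD (xs : List Int) : (runsB xs).headD 0 = xs.headD 0 := by
  cases xs <;> rfl

-- A's loop ignores elements different from the current lane
theorem goA_dropWhile (v : Int) :
    ∀ (xs : List Int) (m cl : Int), v ≠ cl →
      minimumMovementGo m cl xs = minimumMovementGo m cl (xs.dropWhile (fun y => y == v)) := by
  intro xs
  induction xs with
  | nil => intro m cl _; rfl
  | cons x rest ih =>
    intro m cl hv
    by_cases h : x = v
    · subst h
      have hx : (x == cl) = false := by simp [hv]
      simp only [List.dropWhile_cons, beq_self_eq_true, if_pos, minimumMovementGo, hx,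
        Bool.false_eq_true, if_neg, not_false_eq_true]
      exact ih m cl hv
    · simp [h]

-- main loop correspondence, by strong induction on the length
theorem go_eq : ∀ (n : Nat) (xs : List Int) (m cl : Int), xs.length ≤ n →
    minimumMovementGo m cl xs = minimumMovementAltGo m cl (runsB xs) := by
  intro n
  induction n with
  | zero =>
    intro xs m cl h
    have : xs = [] := List.eq_nil_of_length_eq_zero (Nat.le_zero.mp h)
    subst this; rfl
  | succ n ih =>
    intro xs m cl h
    cases xs with
    | nil => rfl
    | cons x rest =>
      simp only [List.length_cons, Nat.succ_le_succ_iff] at h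
      have hlen : (rest.dropWhile (fun y => y == x)).length ≤ n :=
        le_trans (List.length_dropWhile_le _ _) h
      by_cases hx : x = cl
      · subst hx
        -- both sides fire: A scans forward, B looks at the next run
        have hnd : nextDifferent x (x :: rest) = (runsAux x rest).headD 0 := by
          rw [runsAux_eq_runsB, runsB_headD, nextDifferent_eq_dropWhile]
          simp
        simp only [minimumMovementGo, runsB, minimumMovementAltGo, beq_self_eq_true, if_pos]
        rw [hnd, pick_eq]
        rw [goA_dropWhile x rest (m + 1) _ (Ne.symm (pickB_ne x ((runsAux x rest).headD 0)))]
        rw [ih _ _ _ hlen, runsAux_eq_runsB]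
      · have hxb : (x == cl) = false := by simp [hx]
        simp only [minimumMovementGo, runsB, minimumMovementAltGo, hxb, Bool.false_eq_true,
          if_neg, not_false_eq_true]
        rw [goA_dropWhile x rest m cl hx, ih _ _ _ hlen, runsAux_eq_runsB]

-- ===== VERDICT (by name: the statement is the Claim_ definition above) =====
theorem minimumMovement_spec : Claim_equal_minimumMovement := by
  intro xs _
  unfold Spec_minimumMovement minimumMovement minimumMovement_alt
  exact go_eq xs.length xs 0 2 le_rfl
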